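-- pv_equiv track=rewrite | github.com/kiriclope/HiDN | src/licks/licks.py | split_trials
-- ===== SOURCE A (Python) =====
-- def split_trials(series, go_distractors, no_go_distractors, responses, trial_length=21):
--     all_trials = []
--     trials_go = []
--     trials_no_go = []
--     trials_without_distractor = []
--     labels = []
--
--     i = 0
--     while i < len(series):
--         if series[i][0] == "sample":
--             end_of_trial = (
--                 series[i][1] + trial_length
--             )  # Added trial length to the sample timestamp
--
--             # DPA trial
--             if i + 1 < len(series) and series[i + 1][0] == "test":
--                 if any(
--                     end_of_trial > r > series[i + 1][1] for r in responses
--                 ):  # Check if a response occurred within this trial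
--                     trials_without_distractor.append((series[i][1], end_of_trial))
--                     all_trials.append((series[i][1], end_of_trial))
--                     labels.append(0)
--
--                 i += 2
--             # GNG trials
--             elif (
--                 i + 2 < len(series)
--                 and series[i + 1][0] == "distractor"
--                 and series[i + 2][0] == "test"
--             ):
--                 if any(
--                     end_of_trial > r > series[i + 2][1] for r in responses
--                 ):  # Check if a response occurred within this trial
--                     all_trials.append((series[i][1], end_of_trial))
--                     if series[i + 1][1] in go_distractors:
--                         trials_go.append((series[i][1], end_of_trial))
--                         labels.append(1)
--                     elif series[i + 1][1] in no_go_distractors: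
--                         trials_no_go.append((series[i][1], end_of_trial))
--                         labels.append(2)
--                 i += 3
--             else:
--                 i += 1
--         else:
--             i += 1
--
--     return trials_without_distractor, trials_go, trials_no_go, all_trials, labels
-- ===== SOURCE B (Python) =====
-- def split_trials(series, go_distractors, no_go_distractors, responses, trial_length=21):
--     # Two-phase rewrite: sort the responses once and binary-search each trial's
--     # window, parse the timeline into trial records, then build the five outputs.
--     srt = sorted(responses)
--     n = len(srt)
--
--     def responded(after, before):
--         # True iff some response r satisfies after < r < before.
--         lo, hi = 0, n
--         while lo < hi:
--             mid = (lo + hi) // 2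
--             if srt[mid] <= after:
--                 lo = mid + 1
--             else:
--                 hi = mid
--         return lo < n and srt[lo] < before
--
--     go_set = set(go_distractors)
--     no_go_set = set(no_go_distractors)
--
--     # Phase 1: parse the timeline into responded trials (start, end, distractor-or-None).
--     trials = []
--     i = 0
--     m = len(series)
--     while i < m:
--         if series[i][0] != "sample":
--             i += 1
--             continue
--         start = series[i][1]
--         end = start + trial_length
--         if i + 1 < m and series[i + 1][0] == "test":
--             if responded(series[i + 1][1], end):
--                 trials.append((start, end, None))
--             i += 2
--         elif i + 2 < m and series[i + 1][0] == "distractor" and series[i + 2][0] == "test":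
--             if responded(series[i + 2][1], end):
--                 trials.append((start, end, series[i + 1][1]))
--             i += 3
--         else:
--             i += 1
--
--     # Phase 2: classify.
--     trials_without_distractor = [(s, e) for s, e, d in trials if d is None]
--     trials_go = [(s, e) for s, e, d in trials if d is not None and d in go_set]
--     trials_no_go = [(s, e) for s, e, d in trials
--                     if d is not None and d not in go_set and d in no_go_set]
--     all_trials = [(s, e) for s, e, d in trials]
--     labels = [0 if d is None else (1 if d in go_set else 2)
--               for s, e, d in trials
--               if d is None or d in go_set or d in no_go_set]
--
--     return trials_without_distractor, trials_go, trials_no_go, all_trials, labels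
-- ===== Notes on version B (the rewrite author's own statement) =====
-- stated objective: alternative
-- what changed: B sorts the responses once and binary-searches each trial's response window instead of scanning all responses per trial, uses sets for distractor membership, and splits the work into a parse phase (trial records) followed by a classification phase instead of interleaved appends.
import Mathlib
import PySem

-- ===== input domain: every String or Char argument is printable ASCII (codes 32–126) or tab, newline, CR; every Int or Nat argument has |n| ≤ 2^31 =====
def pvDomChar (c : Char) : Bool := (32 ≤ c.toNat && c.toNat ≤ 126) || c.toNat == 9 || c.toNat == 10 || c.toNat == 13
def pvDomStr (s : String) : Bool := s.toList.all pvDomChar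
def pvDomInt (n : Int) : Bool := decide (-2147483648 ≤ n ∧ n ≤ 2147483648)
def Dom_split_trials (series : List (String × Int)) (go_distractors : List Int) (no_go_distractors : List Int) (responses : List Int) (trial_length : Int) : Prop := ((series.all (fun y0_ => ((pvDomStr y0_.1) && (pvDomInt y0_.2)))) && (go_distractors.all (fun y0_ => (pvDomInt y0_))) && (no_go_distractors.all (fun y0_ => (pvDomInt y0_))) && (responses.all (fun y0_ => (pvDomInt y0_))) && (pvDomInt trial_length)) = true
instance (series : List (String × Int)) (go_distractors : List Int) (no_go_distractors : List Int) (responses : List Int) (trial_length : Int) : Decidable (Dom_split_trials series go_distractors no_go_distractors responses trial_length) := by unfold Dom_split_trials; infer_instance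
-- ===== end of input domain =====

-- B sorts the responses once and binary-searches each trial's window (sets for distractor
-- membership; parse-then-classify decomposition) instead of scanning all responses per trial.
set_option maxRecDepth 8000


-- ===== PORT A =====
-- any(end_of_trial > r > t for r in responses)
def pyAnySplit (responses : List Int) (e t : Int) : Bool :=
  responses.any (fun r => decide (e > r) && decide (r > t))

-- A's while-loop; the five accumulator lists are the five result lists.
-- All series indices are guarded in range, so List.getD is exact here.
def splitLoopA (series : List (String × Int)) (go_distractors no_go_distractors responses : List Int) (trial_length : Int) (i : Nat) (two go ngo all : List (Int × Int)) (labels : List Int) : (List (Int × Int)) × (List (Int × Int)) × (List (Int × Int)) × (List (Int × Int)) × List Int :=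
  if _h : i < series.length then
    let c := series.getD i ("", 0)
    if c.1 = "sample" then
      let e := c.2 + trial_length
      let c1 := series.getD (i+1) ("", 0)
      if i + 1 < series.length ∧ c1.1 = "test" then
        if pyAnySplit responses e c1.2 then
          splitLoopA series go_distractors no_go_distractors responses trial_length (i+2)
            (two ++ [(c.2, e)]) go ngo (all ++ [(c.2, e)]) (labels ++ [0])
        else
          splitLoopA series go_distractors no_go_distractors responses trial_length (i+2) two go ngo all labels
      else
        let c2 := series.getD (i+2) ("", 0)
        if i + 2 < series.length ∧ c1.1 = "distractor" ∧ c2.1 = "test" then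
          if pyAnySplit responses e c2.2 then
            if c1.2 ∈ go_distractors then
              splitLoopA series go_distractors no_go_distractors responses trial_length (i+3)
                two (go ++ [(c.2, e)]) ngo (all ++ [(c.2, e)]) (labels ++ [1])
            else if c1.2 ∈ no_go_distractors then
              splitLoopA series go_distractors no_go_distractors responses trial_length (i+3)
                two go (ngo ++ [(c.2, e)]) (all ++ [(c.2, e)]) (labels ++ [2])
            else
              splitLoopA series go_distractors no_go_distractors responses trial_length (i+3)
                two go ngo (all ++ [(c.2, e)]) labels
          else
            splitLoopA series go_distractors no_go_distractors responses trial_length (i+3) two go ngo all labels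
        else
          splitLoopA series go_distractors no_go_distractors responses trial_length (i+1) two go ngo all labels
    else
      splitLoopA series go_distractors no_go_distractors responses trial_length (i+1) two go ngo all labels
  else (two, go, ngo, all, labels)
termination_by series.length - i
decreasing_by all_goals omega

def split_trials (series : List (String × Int)) (go_distractors : List Int) (no_go_distractors : List Int) (responses : List Int) (trial_length : Int) : (List (Int × Int)) × (List (Int × Int)) × (List (Int × Int)) × (List (Int × Int)) × List Int :=
  splitLoopA series go_distractors no_go_distractors responses trial_length 0 [] [] [] [] []

-- ===== PORT B =====
-- B's hand-written binary search (bisect_right): first index in [lo,hi) with srt[idx] > x.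
-- Indexing is always in range (lo ≤ mid < hi ≤ len), so List.getD is exact here.
def firstGtLoop (srt : List Int) (x : Int) (lo hi : Nat) : Nat :=
  if _h : lo < hi then
    if srt.getD ((lo + hi) / 2) 0 ≤ x then firstGtLoop srt x ((lo + hi) / 2 + 1) hi
    else firstGtLoop srt x lo ((lo + hi) / 2)
  else lo
termination_by hi - lo
decreasing_by all_goals omega

-- responded(after, before): some sorted response r has after < r < before
def respondedB (srt : List Int) (after before : Int) : Bool :=
  let i := firstGtLoop srt after 0 srt.length
  decide (i < srt.length) && decide (srt.getD i 0 < before)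

-- phase 1: the `trials` records (start, end, distractor-or-None)
def parseB (series : List (String × Int)) (srt : List Int) (tl : Int) (i : Nat) (acc : List (Int × Int × Option Int)) : List (Int × Int × Option Int) :=
  if _h : i < series.length then
    let c := series.getD i ("", 0)
    if c.1 ≠ "sample" then parseB series srt tl (i+1) acc
    else
      let e := c.2 + tl
      let c1 := series.getD (i+1) ("", 0)
      if i + 1 < series.length ∧ c1.1 = "test" then
        parseB series srt tl (i+2) (if respondedB srt c1.2 e then acc ++ [(c.2, e, none)] else acc)
      else
        let c2 := series.getD (i+2) ("", 0)
        if i + 2 < series.length ∧ c1.1 = "distractor" ∧ c2.1 = "test" then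
          parseB series srt tl (i+3) (if respondedB srt c2.2 e then acc ++ [(c.2, e, some c1.2)] else acc)
        else parseB series srt tl (i+1) acc
  else acc
termination_by series.length - i
decreasing_by all_goals omega

-- phase 2: the five comprehensions over `trials`
def selWd (ts : List (Int × Int × Option Int)) : List (Int × Int) :=
  ts.filterMap (fun t => match t.2.2 with | none => some (t.1, t.2.1) | some _ => none)
def selGo (goSet : List Int) (ts : List (Int × Int × Option Int)) : List (Int × Int) :=
  ts.filterMap (fun t => match t.2.2 with | some d => if d ∈ goSet then some (t.1, t.2.1) else none | none => none)
def selNoGo (goSet ngSet : List Int) (ts : List (Int × Int × Option Int)) : List (Int × Int) :=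
  ts.filterMap (fun t => match t.2.2 with | some d => if d ∉ goSet ∧ d ∈ ngSet then some (t.1, t.2.1) else none | none => none)
def selAll (ts : List (Int × Int × Option Int)) : List (Int × Int) :=
  ts.map (fun t => (t.1, t.2.1))
def selLab (goSet ngSet : List Int) (ts : List (Int × Int × Option Int)) : List Int :=
  ts.filterMap (fun t => match t.2.2 with | none => some 0 | some d => if d ∈ goSet then some 1 else if d ∈ ngSet then some 2 else none)

def split_trials_alt (series : List (String × Int)) (go_distractors : List Int) (no_go_distractors : List Int) (responses : List Int) (trial_length : Int) : (List (Int × Int)) × (List (Int × Int)) × (List (Int × Int)) × (List (Int × Int)) × List Int :=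
  let srt := PySem.List.sorted responses (fun x => x) false
  let goSet := PySem.Set.ofList go_distractors
  let ngSet := PySem.Set.ofList no_go_distractors
  let trials := parseB series srt trial_length 0 []
  (selWd trials, selGo goSet trials, selNoGo goSet ngSet trials, selAll trials, selLab goSet ngSet trials)

-- ===== PRECONDITION & SPEC =====
def Spec_split_trials (series : List (String × Int)) (go_distractors : List Int) (no_go_distractors : List Int) (responses : List Int) (trial_length : Int) (out : (List (Int × Int)) × (List (Int × Int)) × (List (Int × Int)) × (List (Int × Int)) × List Int) : Prop := out = split_trials_alt series go_distractors no_go_distractors responses trial_length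
instance (series : List (String × Int)) (go_distractors : List Int) (no_go_distractors : List Int) (responses : List Int) (trial_length : Int) (out : (List (Int × Int)) × (List (Int × Int)) × (List (Int × Int)) × (List (Int × Int)) × List Int) : Decidable (Spec_split_trials series go_distractors no_go_distractors responses trial_length out) := by unfold Spec_split_trials; infer_instance

-- ===== CLAIM (what is proved, stated in full; the proofs are below) =====
def Claim_equal_split_trials : Prop := ∀ (series : List (String × Int)) (go_distractors : List Int) (no_go_distractors : List Int) (responses : List Int) (trial_length : Int), Dom_split_trials series go_distractors no_go_distractors responses trial_length → Spec_split_trials series go_distractors no_go_distractors responses trial_length (split_trials series go_distractors no_go_distractors responses trial_length)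

-- ===== LEMMAS AND PROOFS =====

lemma parseB_acc (series : List (String × Int)) (srt : List Int) (tl : Int) :
    ∀ i acc, parseB series srt tl i acc = acc ++ parseB series srt tl i [] := by
  have key : ∀ n i acc, series.length - i < n → parseB series srt tl i acc = acc ++ parseB series srt tl i [] := by
    intro n
    induction n with
    | zero => intro i acc h; omega
    | succ n ih =>
      intro i acc hn
      conv_lhs => rw [parseB]
      conv_rhs => rw [parseB]
      by_cases h : i < series.length
      · simp only [dif_pos h]
        split
        · rw [ih (i+1) acc (by omega)]
        · split
          · split
            · rw [ih (i+2) _ (by omega)]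
              conv_rhs => rw [ih (i+2) _ (by omega)]
              simp
            · rw [ih (i+2) _ (by omega)]
          · split
            · split
              · rw [ih (i+3) _ (by omega)]
                conv_rhs => rw [ih (i+3) _ (by omega)]
                simp
              · rw [ih (i+3) _ (by omega)]
            · rw [ih (i+1) acc (by omega)]
      · simp only [dif_neg h]; simp
  exact fun i acc => key (series.length - i + 1) i acc (by omega)

lemma getD_mono_of_pairwise (srt : List Int) (hs : List.Pairwise (· ≤ ·) srt)
    (j k : Nat) (hjk : j ≤ k) (hk : k < srt.length) :
    srt.getD j 0 ≤ srt.getD k 0 := by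
  rcases Nat.lt_or_ge j k with h | h
  · rw [List.getD_eq_getElem _ _ (by omega), List.getD_eq_getElem _ _ hk]
    exact List.pairwise_iff_getElem.mp hs j k (by omega) hk h
  · have : j = k := by omega
    subst this; exact le_refl _

lemma firstGt_spec (srt : List Int) (x : Int) (hs : List.Pairwise (· ≤ ·) srt) :
    ∀ lo hi, lo ≤ hi → hi ≤ srt.length →
      lo ≤ firstGtLoop srt x lo hi ∧ firstGtLoop srt x lo hi ≤ hi ∧
      (∀ j, lo ≤ j → j < firstGtLoop srt x lo hi → srt.getD j 0 ≤ x) ∧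
      (∀ j, firstGtLoop srt x lo hi ≤ j → j < hi → x < srt.getD j 0) := by
  intro lo hi
  fun_induction firstGtLoop srt x lo hi with
  | case1 lo hi h hle ih =>
    intro _ hhi
    obtain ⟨h1, h2, h3, h4⟩ := ih (by omega) hhi
    refine ⟨by omega, h2, ?_, h4⟩
    intro j hj hj2
    rcases Nat.lt_or_ge j ((lo + hi) / 2 + 1) with hc | hc
    · exact le_trans (getD_mono_of_pairwise srt hs j ((lo+hi)/2) (by omega) (by omega)) hle
    · exact h3 j hc hj2
  | case2 lo hi h hgt ih =>
    intro _ hhi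
    obtain ⟨h1, h2, h3, h4⟩ := ih (by omega) (by omega)
    refine ⟨h1, by omega, h3, ?_⟩
    intro j hj hj2
    rcases Nat.lt_or_ge j ((lo + hi) / 2) with hc | hc
    · exact h4 j hj hc
    · calc x < srt.getD ((lo+hi)/2) 0 := by omega
        _ ≤ srt.getD j 0 := getD_mono_of_pairwise srt hs _ j hc (by omega)
  | case3 lo hi h =>
    intro hle hhi
    exact ⟨le_refl _, by omega, by omega, by omega⟩

lemma respondedB_iff (srt : List Int) (hs : List.Pairwise (· ≤ ·) srt) (x e : Int) :
    respondedB srt x e = true ↔ ∃ r ∈ srt, x < r ∧ r < e := by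
  obtain ⟨h1, h2, h3, h4⟩ := firstGt_spec srt x hs 0 srt.length (by omega) (le_refl _)
  unfold respondedB
  simp only [Bool.and_eq_true, decide_eq_true_eq]
  constructor
  · rintro ⟨hi, hlt⟩
    refine ⟨srt.getD (firstGtLoop srt x 0 srt.length) 0, ?_, h4 _ (le_refl _) hi, hlt⟩
    rw [List.getD_eq_getElem _ _ hi]; exact List.getElem_mem hi
  · rintro ⟨r, hr, hxr, hre⟩
    obtain ⟨j, hj, rfl⟩ := List.mem_iff_getElem.mp hr
    have hjge : firstGtLoop srt x 0 srt.length ≤ j := by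
      by_contra hc
      have := h3 j (by omega) (by omega)
      rw [List.getD_eq_getElem _ _ hj] at this; omega
    refine ⟨by omega, ?_⟩
    calc srt.getD (firstGtLoop srt x 0 srt.length) 0 ≤ srt.getD j 0 :=
          getD_mono_of_pairwise srt hs _ j hjge hj
      _ < e := by rw [List.getD_eq_getElem _ _ hj]; exact hre

lemma check_eq (responses : List Int) (t e : Int) :
    respondedB (PySem.List.sorted responses (fun x => x) false) t e = pyAnySplit responses e t := by
  rw [Bool.eq_iff_iff]
  rw [respondedB_iff _ (by simpa using PySem.List.sorted_pairwise responses (fun x => x)) t e]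
  unfold pyAnySplit
  simp [List.any_eq_true, PySem.List.mem_sorted, and_comm]

lemma loop_eq (series : List (String × Int)) (gd ngd responses : List Int) (tl : Int) :
    ∀ i two go ngo all lab,
      splitLoopA series gd ngd responses tl i two go ngo all lab =
        (two ++ selWd (parseB series (PySem.List.sorted responses (fun x => x) false) tl i []),
         go ++ selGo (PySem.Set.ofList gd) (parseB series (PySem.List.sorted responses (fun x => x) false) tl i []),
         ngo ++ selNoGo (PySem.Set.ofList gd) (PySem.Set.ofList ngd) (parseB series (PySem.List.sorted responses (fun x => x) false) tl i []),
         all ++ selAll (parseB series (PySem.List.sorted responses (fun x => x) false) tl i []),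
         lab ++ selLab (PySem.Set.ofList gd) (PySem.Set.ofList ngd) (parseB series (PySem.List.sorted responses (fun x => x) false) tl i [])) := by
  have key : ∀ n i two go ngo all lab, series.length - i < n →
      splitLoopA series gd ngd responses tl i two go ngo all lab =
        (two ++ selWd (parseB series (PySem.List.sorted responses (fun x => x) false) tl i []),
         go ++ selGo (PySem.Set.ofList gd) (parseB series (PySem.List.sorted responses (fun x => x) false) tl i []),
         ngo ++ selNoGo (PySem.Set.ofList gd) (PySem.Set.ofList ngd) (parseB series (PySem.List.sorted responses (fun x => x) false) tl i []),
         all ++ selAll (parseB series (PySem.List.sorted responses (fun x => x) false) tl i []),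
         lab ++ selLab (PySem.Set.ofList gd) (PySem.Set.ofList ngd) (parseB series (PySem.List.sorted responses (fun x => x) false) tl i [])) := by
    intro n
    induction n with
    | zero => intro i _ _ _ _ _ h; omega
    | succ n ih =>
      intro i two go ngo all lab hn
      rw [splitLoopA]
      conv_rhs => rw [parseB]
      by_cases h : i < series.length
      · simp only [dif_pos h]
        by_cases hsamp : (series.getD i ("", 0)).1 = "sample"
        · simp only [if_pos hsamp, if_neg (show ¬((series.getD i ("", 0)).1 ≠ "sample") from not_not_intro hsamp)]
          by_cases hdpa : i + 1 < series.length ∧ (series.getD (i+1) ("", 0)).1 = "test"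
          · simp only [if_pos hdpa, check_eq responses]
            by_cases hresp : pyAnySplit responses ((series.getD i ("", 0)).2 + tl) ((series.getD (i+1) ("", 0)).2) = true
            · simp only [if_pos hresp, List.nil_append]
              conv_rhs => rw [parseB_acc series _ tl (i+2)]
              rw [ih (i+2) _ _ _ _ _ (by omega)]
              simp only [selWd, selGo, selNoGo, selAll, selLab, List.filterMap_append, List.map_append, List.filterMap_cons, List.map_cons, List.filterMap_nil, List.map_nil]
              simp
            · simp only [if_neg hresp, ih (i+2) _ _ _ _ _ (by omega)]
          · simp only [if_neg hdpa]
            by_cases hgng : i + 2 < series.length ∧ (series.getD (i+1) ("", 0)).1 = "distractor" ∧ (series.getD (i+2) ("", 0)).1 = "test"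
            · simp only [if_pos hgng, check_eq responses]
              by_cases hresp : pyAnySplit responses ((series.getD i ("", 0)).2 + tl) ((series.getD (i+2) ("", 0)).2) = true
              · simp only [if_pos hresp, List.nil_append]
                conv_rhs => rw [parseB_acc series _ tl (i+3)]
                by_cases hgo : (series.getD (i+1) ("", 0)).2 ∈ gd
                · have hgo' := hgo
                  simp only [List.getD_eq_getElem?_getD] at hgo'
                  simp only [if_pos hgo]
                  rw [ih (i+3) _ _ _ _ _ (by omega)]
                  simp [selWd, selGo, selNoGo, selAll, selLab, PySem.Set.mem_ofList, hgo']
                · have hgo' := hgo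
                  simp only [List.getD_eq_getElem?_getD] at hgo'
                  simp only [if_neg hgo]
                  by_cases hng : (series.getD (i+1) ("", 0)).2 ∈ ngd
                  · have hng' := hng
                    simp only [List.getD_eq_getElem?_getD] at hng'
                    simp only [if_pos hng]
                    rw [ih (i+3) _ _ _ _ _ (by omega)]
                    simp [selWd, selGo, selNoGo, selAll, selLab, PySem.Set.mem_ofList, hgo', hng']
                  · have hng' := hng
                    simp only [List.getD_eq_getElem?_getD] at hng'
                    simp only [if_neg hng]
                    rw [ih (i+3) _ _ _ _ _ (by omega)]
                    simp [selWd, selGo, selNoGo, selAll, selLab, PySem.Set.mem_ofList, hgo', hng']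
              · simp only [if_neg hresp, ih (i+3) _ _ _ _ _ (by omega)]
            · simp only [if_neg hgng, ih (i+1) _ _ _ _ _ (by omega)]
        · simp only [ne_eq, if_neg hsamp, if_pos hsamp, ih (i+1) _ _ _ _ _ (by omega)]
      · simp only [dif_neg h]
        simp [selWd, selGo, selNoGo, selAll, selLab]
  exact fun i two go ngo all lab => key (series.length - i + 1) i two go ngo all lab (by omega)

-- ===== VERDICT (by name: the statement is the Claim_ definition above) =====
theorem split_trials_spec : Claim_equal_split_trials := by
  intro series gd ngd responses tl _hdom
  unfold Spec_split_trials split_trials split_trials_alt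
  simpa using loop_eq series gd ngd responses tl 0 [] [] [] [] []
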